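-- pv_equiv track=rewrite | github.com/benjaminnigjeh/alphapeptdeep | alphadeep/protein/fasta.py | get_var_mods_per_sites_multi_mods_on_aa
-- ===== SOURCE A (Python) =====
-- import copy
--
-- def get_var_mods_per_sites_multi_mods_on_aa(
--     sequence:str,
--     mod_sites:tuple,
--     var_mod_dict:dict
-- )->list:
--     mods_str_list = ['']
--     for i,site in enumerate(mod_sites):
--         _new_list = []
--         for mod in var_mod_dict[sequence[site-1]]:
--             _lst = copy.deepcopy(mods_str_list)
--             for i in range(len(_lst)):
--                 _lst[i] += mod+';'
--             _new_list.extend(_lst)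
--         mods_str_list = _new_list
--     return [mod[:-1] for mod in mods_str_list]
-- ===== SOURCE B (Python) =====
-- import itertools
--
-- def get_var_mods_per_sites_multi_mods_on_aa(
--     sequence: str,
--     mod_sites: tuple,
--     var_mod_dict: dict
-- ) -> list:
--     lists = [var_mod_dict[sequence[site-1]] for site in mod_sites]
--     return [';'.join(reversed(combo))
--             for combo in itertools.product(*reversed(lists))]
-- ===== Notes on version B (the rewrite author's own statement) =====
-- stated objective: idiomatic
-- what changed: Replaces A's level-by-level accumulator (deepcopy the list, append one mod to every entry, extend) with a single itertools.product enumeration of the per-site mod lists, reversing the factor order and each combination to keep A's exact output order.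
import Mathlib
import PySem

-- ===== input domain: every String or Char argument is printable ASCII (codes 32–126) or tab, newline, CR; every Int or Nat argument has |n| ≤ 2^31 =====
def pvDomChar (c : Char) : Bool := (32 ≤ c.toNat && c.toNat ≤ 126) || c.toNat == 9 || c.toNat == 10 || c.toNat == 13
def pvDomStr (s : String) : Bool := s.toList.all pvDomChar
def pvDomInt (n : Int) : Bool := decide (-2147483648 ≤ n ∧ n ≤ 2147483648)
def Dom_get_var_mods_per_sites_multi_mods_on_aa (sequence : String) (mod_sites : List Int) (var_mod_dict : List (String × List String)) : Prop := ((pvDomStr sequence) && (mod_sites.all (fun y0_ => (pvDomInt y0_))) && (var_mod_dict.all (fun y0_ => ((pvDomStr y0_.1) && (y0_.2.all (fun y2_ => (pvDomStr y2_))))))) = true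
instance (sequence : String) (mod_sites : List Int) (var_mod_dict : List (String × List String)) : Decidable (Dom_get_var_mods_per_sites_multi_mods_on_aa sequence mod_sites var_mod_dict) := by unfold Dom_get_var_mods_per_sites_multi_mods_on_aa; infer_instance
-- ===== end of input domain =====

-- B replaces A's level-by-level accumulator (copy the list, append one mod to every entry,
-- extend) by a direct Cartesian-product enumeration; same return values, different decomposition.

-- Shared helper: 'var_mod_dict[sequence[site-1]]' (both Pythons perform exactly this lookup;
-- total here via defaults — Pre_ excludes the inputs where Python raises).
def pvModsAt (sequence : String) (var_mod_dict : List (String × List String)) (site : Int) : List String :=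
  let key : String :=
    match PySem.Str.pyGet? sequence (site - 1) with
    | some c => String.ofList [c]
    | none => ""
  ((var_mod_dict.find? (fun p => p.1 == key)).map (·.2)).getD []

-- ===== PORT A =====
def get_var_mods_per_sites_multi_mods_on_aa (sequence : String) (mod_sites : List Int) (var_mod_dict : List (String × List String)) : List String :=
  let mods_str_list :=
    mod_sites.foldl
      (fun mods_str_list site =>
        -- _new_list = []; for mod in …: _lst = copies of mods_str_list each += mod+';'; _new_list.extend(_lst)
        (pvModsAt sequence var_mod_dict site).foldl
          (fun new_list md => new_list ++ mods_str_list.map (fun s => s ++ (md ++ ";")))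
          [])
      [""]
  mods_str_list.map (fun md => PySem.Str.slice md none (some (-1)))

-- ===== PORT B =====
-- itertools.product over a list of lists (last factor varies fastest)
def pvProduct : List (List String) → List (List String)
  | [] => [[]]
  | L :: rest => L.flatMap (fun x => (pvProduct rest).map (x :: ·))

def get_var_mods_per_sites_multi_mods_on_aa_alt (sequence : String) (mod_sites : List Int) (var_mod_dict : List (String × List String)) : List String :=
  let lists := mod_sites.map (pvModsAt sequence var_mod_dict)
  (pvProduct lists.reverse).map (fun combo => PySem.Str.join ";" combo.reverse)

-- ===== PRECONDITION & SPEC =====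
-- Pre_ excludes exactly the inputs where Python A raises: a site whose index sequence[site-1]
-- is out of range (IndexError) or whose one-letter key is absent from var_mod_dict (KeyError).
def Pre_get_var_mods_per_sites_multi_mods_on_aa (sequence : String) (mod_sites : List Int) (var_mod_dict : List (String × List String)) : Prop :=
  (mod_sites.all (fun site =>
    match PySem.Str.pyGet? sequence (site - 1) with
    | some c => (var_mod_dict.find? (fun p => p.1 == String.ofList [c])).isSome
    | none => false)) = true
instance (sequence : String) (mod_sites : List Int) (var_mod_dict : List (String × List String)) : Decidable (Pre_get_var_mods_per_sites_multi_mods_on_aa sequence mod_sites var_mod_dict) := by unfold Pre_get_var_mods_per_sites_multi_mods_on_aa; infer_instance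
def pvWitness_get_var_mods_per_sites_multi_mods_on_aa : String × List Int × (List (String × List String)) :=
  ("ACD", [1, 3], [("A", ["a1", "a2"]), ("C", ["c1"]), ("D", ["d1", "d2"])])
def Spec_get_var_mods_per_sites_multi_mods_on_aa (sequence : String) (mod_sites : List Int) (var_mod_dict : List (String × List String)) (out : List String) : Prop := out = get_var_mods_per_sites_multi_mods_on_aa_alt sequence mod_sites var_mod_dict
instance (sequence : String) (mod_sites : List Int) (var_mod_dict : List (String × List String)) (out : List String) : Decidable (Spec_get_var_mods_per_sites_multi_mods_on_aa sequence mod_sites var_mod_dict out) := by unfold Spec_get_var_mods_per_sites_multi_mods_on_aa; infer_instance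

-- ===== CLAIM (what is proved, stated in full; the proofs are below) =====
def Claim_equal_get_var_mods_per_sites_multi_mods_on_aa : Prop := ∀ (sequence : String) (mod_sites : List Int) (var_mod_dict : List (String × List String)), Dom_get_var_mods_per_sites_multi_mods_on_aa sequence mod_sites var_mod_dict → Pre_get_var_mods_per_sites_multi_mods_on_aa sequence mod_sites var_mod_dict → Spec_get_var_mods_per_sites_multi_mods_on_aa sequence mod_sites var_mod_dict (get_var_mods_per_sites_multi_mods_on_aa sequence mod_sites var_mod_dict)

-- ===== LEMMAS AND PROOFS =====

-- 'm1;m2;…;mk;' built the way A builds it: last element of the combo is the leftmost mod string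
def pvSemiStr : List String → String
  | [] => ""
  | m :: rest => pvSemiStr rest ++ (m ++ ";")

theorem pvSemiStr_toList (c : List String) :
    (pvSemiStr c).toList = (c.reverse.map (fun m => m.toList ++ [';'])).flatten := by
  induction c with
  | nil => simp [pvSemiStr]
  | cons m rest ih => simp [pvSemiStr, ih]

theorem pvDropLast_flatten_semi (ms : List (List Char)) :
    ((ms.map (fun m => m ++ [';'])).flatten).dropLast = PySem.Chars.join [';'] ms := by
  induction ms with
  | nil => simp [PySem.Chars.join_nil]
  | cons m rest ih =>
    cases rest with
    | nil => simp [PySem.Chars.join_singleton]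
    | cons q r =>
      rw [PySem.Chars.join_cons_cons]
      simp only [List.map_cons, List.flatten_cons] at ih ⊢
      have hne : q ++ [';'] ++ (List.map (fun m => m ++ [';']) r).flatten ≠ [] := by simp
      rw [List.dropLast_append_of_ne_nil hne, ih]

theorem pvStrExt {s t : String} (h : s.toList = t.toList) : s = t := by
  have h2 := congrArg String.ofList h
  simpa using h2

-- pointwise: A's final 'mod[:-1]' of the ';'-terminated string equals B's ';'.join(reversed(combo))
theorem pvSemiStr_slice (c : List String) :
    PySem.Str.slice (pvSemiStr c) none (some (-1)) = PySem.Str.join ";" c.reverse := by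
  have h : (PySem.Str.slice (pvSemiStr c) none (some (-1))).toList
      = (PySem.Str.join ";" c.reverse).toList := by
    rw [PySem.Str.slice_to_neg_one, PySem.Str.toList_join, pvSemiStr_toList]
    have hsep : (";" : String).toList = [';'] := rfl
    rw [hsep]
    simpa [List.map_map, Function.comp] using
      pvDropLast_flatten_semi (c.reverse.map String.toList)
  exact pvStrExt h

-- the single step A performs per site, as a flatMap
theorem pvStep_eq (R L : List String) :
    L.foldl (fun new_list md => new_list ++ R.map (fun s => s ++ (md ++ ";"))) []
      = L.flatMap (fun md => R.map (fun s => s ++ (md ++ ";"))) := by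
  simpa using PySem.List.foldl_append_eq_flatMap
    (fun md => R.map (fun s => s ++ (md ++ ";"))) L []

-- main invariant: A's accumulator over the factor lists = B's product, rendered by pvSemiStr
theorem pvFoldl_eq_product (Ls : List (List String)) :
    Ls.foldl (fun R L => L.foldl (fun new_list md => new_list ++ R.map (fun s => s ++ (md ++ ";"))) []) [""]
      = (pvProduct Ls.reverse).map pvSemiStr := by
  induction Ls using List.reverseRecOn with
  | nil => simp [pvProduct, pvSemiStr]
  | append_singleton Ls L ih =>
    rw [List.foldl_append, List.foldl_cons, List.foldl_nil, ih,
      List.reverse_append, List.reverse_singleton, List.singleton_append]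
    show (L.foldl (fun new_list md =>
        new_list ++ ((pvProduct Ls.reverse).map pvSemiStr).map (fun s => s ++ (md ++ ";"))) [])
      = (pvProduct (L :: Ls.reverse)).map pvSemiStr
    rw [pvStep_eq]
    simp only [pvProduct, List.map_flatMap, List.map_map]
    apply List.flatMap_congr
    intro md _
    apply List.map_congr_left
    intro c _
    simp [Function.comp, pvSemiStr]

-- ===== VERDICT (by name: the statement is the Claim_ definition above) =====
theorem get_var_mods_per_sites_multi_mods_on_aa_spec : Claim_equal_get_var_mods_per_sites_multi_mods_on_aa := by
  intro sequence mod_sites var_mod_dict _ _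
  show get_var_mods_per_sites_multi_mods_on_aa sequence mod_sites var_mod_dict
      = get_var_mods_per_sites_multi_mods_on_aa_alt sequence mod_sites var_mod_dict
  unfold get_var_mods_per_sites_multi_mods_on_aa get_var_mods_per_sites_multi_mods_on_aa_alt
  dsimp only
  rw [← List.foldl_map, pvFoldl_eq_product, List.map_map]
  apply List.map_congr_left
  intro c _
  exact pvSemiStr_slice c
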